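-- pv_equiv track=rewrite | github.com/Muzque/Leetcode | AlgoExpert/recursion/ambiguousMeasurements.py | ambiguousMeasurements
-- ===== SOURCE A (Python) =====
-- def ambiguousMeasurements(measuringCups, low, high, cached=None):
--     if cached is None:
--         cached = {}
--     key = f'{low}:{high}'
--     if key in cached:
--         return cached[key]
--     if high <= 0:
--         return False
--
--     for cup in measuringCups:
--         if cup[0] >= low and high >= cup[1]:
--             cached[key] = True
--             return True
--
--         if ambiguousMeasurements(measuringCups, low-cup[0], high-cup[1], cached):
--             cached[key] = True
--             return True
--     cached[key] = False
--     return False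
-- ===== SOURCE B (Python) =====
-- # Bottom-up DP over the reachable state graph (BFS reachability + table filled in
-- # increasing hi), instead of A's top-down memoized recursion; iterative, no mutation
-- # of the caller's cache (A writes into `cached`; equivalence is on the return value).
-- def ambiguousMeasurements(measuringCups, low, high, cached=None):
--     cache = cached if cached is not None else {}
--     start = (low, high)
--     seen = {start}
--     order = [start]
--     frontier = [start]
--     while frontier:
--         nxt = []
--         for (lo, hi) in frontier:
--             if f'{lo}:{hi}' in cache or hi <= 0:
--                 continue
--             for cup in measuringCups:
--                 s = (lo - cup[0], hi - cup[1])
--                 if s not in seen: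
--                     seen.add(s)
--                     order.append(s)
--                     nxt.append(s)
--         frontier = nxt
--     val = {}
--     for (lo, hi) in sorted(order, key=lambda s: s[1]):
--         key = f'{lo}:{hi}'
--         if key in cache:
--             val[(lo, hi)] = cache[key]
--         elif hi <= 0:
--             val[(lo, hi)] = False
--         else:
--             val[(lo, hi)] = any(
--                 (cup[0] >= lo and hi >= cup[1]) or val[(lo - cup[0], hi - cup[1])]
--                 for cup in measuringCups)
--     return val[start]
-- ===== Notes on version B (the rewrite author's own statement) =====
-- stated objective: alternative
-- what changed: Top-down memoized recursion (mutating the shared cache dict) is replaced by an iterative two-phase bottom-up DP: a BFS computes the set of reachable (lo,hi) states, then a table is filled in increasing hi; the caller's cache is only read, never written.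
-- outside the precondition, e.g. on ambiguousMeasurements([[5, 0]], 1, 3, None): A returns True, B does not finish within the time limit; on ambiguousMeasurements([[2, 1], [1]], 1, 2, None): A returns True, B raises IndexError
import Mathlib
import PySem

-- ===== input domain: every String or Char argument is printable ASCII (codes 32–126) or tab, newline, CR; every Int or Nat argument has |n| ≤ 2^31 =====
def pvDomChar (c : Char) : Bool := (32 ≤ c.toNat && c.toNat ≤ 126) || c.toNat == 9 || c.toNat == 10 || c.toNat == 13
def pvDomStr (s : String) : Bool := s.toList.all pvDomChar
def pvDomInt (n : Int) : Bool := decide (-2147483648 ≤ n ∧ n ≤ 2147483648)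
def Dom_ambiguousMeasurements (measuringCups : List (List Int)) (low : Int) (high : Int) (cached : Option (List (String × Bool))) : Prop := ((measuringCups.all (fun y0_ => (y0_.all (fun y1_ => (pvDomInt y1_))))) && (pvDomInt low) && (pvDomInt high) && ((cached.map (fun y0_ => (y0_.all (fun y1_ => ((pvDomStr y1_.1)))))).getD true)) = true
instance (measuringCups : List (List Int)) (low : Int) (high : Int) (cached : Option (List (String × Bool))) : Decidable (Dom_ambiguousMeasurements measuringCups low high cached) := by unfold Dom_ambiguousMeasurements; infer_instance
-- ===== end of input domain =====

-- B replaces A's top-down memoized recursion by an iterative bottom-up DP (BFS reachability,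
-- then a table filled in increasing hi); A mutates the caller's `cached` dict, B only reads it —
-- the equivalence proved here is about the RETURN value only.

-- shared small helpers: the cache key f'{lo}:{hi}' and the total form of cup[i]
-- (out-of-range cup indices are excluded by Pre_)
def pvKey (lo hi : Int) : String := PySem.Int.toStr lo ++ ":" ++ PySem.Int.toStr hi
def pvCup (cup : List Int) (i : Int) : Int := (PySem.List.pyGet? cup i).getD 0

-- ===== PORT A =====
-- fuel = high.toNat + 1 always suffices on Pre_ inputs: each nested call strictly decreases high
mutual
def pvGoA (cups : List (List Int)) (fuel : Nat) (low high : Int) (d : PySem.Dict String Bool) : Bool × PySem.Dict String Bool :=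
  match fuel with
  | 0 => (false, d)
  | f + 1 =>
    match PySem.Dict.get? d (pvKey low high) with
    | some b => (b, d)
    | none =>
      if high ≤ 0 then (false, d)
      else pvLoopA cups cups f low high d
termination_by (fuel, 0)
def pvLoopA (cups rest : List (List Int)) (f : Nat) (low high : Int) (d : PySem.Dict String Bool) : Bool × PySem.Dict String Bool :=
  match rest with
  | [] => (false, PySem.Dict.insert d (pvKey low high) false)
  | cup :: rs =>
    if pvCup cup 0 ≥ low ∧ high ≥ pvCup cup 1 then (true, PySem.Dict.insert d (pvKey low high) true)
    else
      let r := pvGoA cups f (low - pvCup cup 0) (high - pvCup cup 1) d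
      if r.1 then (true, PySem.Dict.insert r.2 (pvKey low high) true)
      else pvLoopA cups rs f low high r.2
termination_by (f, rest.length + 1)
end

def ambiguousMeasurements (measuringCups : List (List Int)) (low : Int) (high : Int) (cached : Option (List (String × Bool))) : Bool :=
  (pvGoA measuringCups (high.toNat + 1) low high (PySem.Dict.ofList (cached.getD []))).1

-- ===== PORT B =====
-- the skip test of the BFS: state is already answered by the cache, or hi <= 0
def pvSkip (d0 : PySem.Dict String Bool) (s : Int × Int) : Bool :=
  PySem.Dict.contains d0 (pvKey s.1 s.2) || decide (s.2 ≤ 0)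

-- inner 'for cup in measuringCups' of the BFS round; the PySem.Set is simultaneously
-- Source B's `seen` set and its `order` list (a PySem.Set IS the insertion-ordered list)
def pvScan (cups : List (List Int)) (acc : PySem.Set (Int × Int) × List (Int × Int)) (s : Int × Int) : PySem.Set (Int × Int) × List (Int × Int) :=
  cups.foldl (fun a cup =>
    let t := (s.1 - pvCup cup 0, s.2 - pvCup cup 1)
    if PySem.Set.contains a.1 t then a else (PySem.Set.add a.1 t, a.2 ++ [t])) acc

-- Source B's `while frontier:` loop; fuel = high.toNat + 2 always suffices on Pre_ inputs
def pvBfs (cups : List (List Int)) (d0 : PySem.Dict String Bool) : Nat → List (Int × Int) → PySem.Set (Int × Int) → PySem.Set (Int × Int)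
  | 0, _, seen => seen
  | f + 1, frontier, seen =>
    if frontier.isEmpty then seen
    else
      let st := frontier.foldl (fun acc s => if pvSkip d0 s then acc else pvScan cups acc s) (seen, [])
      pvBfs cups d0 f st.2 st.1

-- Source B's second loop: fill `val` over the states sorted by hi
def pvEval (cups : List (List Int)) (d0 : PySem.Dict String Bool) (states : List (Int × Int)) : PySem.Dict (Int × Int) Bool :=
  states.foldl (fun val s =>
    PySem.Dict.insert val s
      (match PySem.Dict.get? d0 (pvKey s.1 s.2) with
       | some b => b
       | none =>
         if s.2 ≤ 0 then false
         else cups.any (fun cup =>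
           (decide (pvCup cup 0 ≥ s.1) && decide (s.2 ≥ pvCup cup 1)) ||
           (PySem.Dict.get? val (s.1 - pvCup cup 0, s.2 - pvCup cup 1)).getD false)))
    PySem.Dict.empty

def ambiguousMeasurements_alt (measuringCups : List (List Int)) (low : Int) (high : Int) (cached : Option (List (String × Bool))) : Bool :=
  let d0 := PySem.Dict.ofList (cached.getD [])
  let seen := pvBfs measuringCups d0 (high.toNat + 2) [(low, high)] (PySem.Set.ofList [(low, high)])
  let states := PySem.List.sorted seen (fun s => s.2) false
  ((pvEval measuringCups d0 states).get? (low, high)).getD false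

-- ===== PRECONDITION & SPEC =====
-- Pre_ excludes only the inputs where the start state is unresolved (no cache hit, high > 0) and
-- some cup has fewer than two entries or a non-positive second entry: there A raises IndexError or
-- recurses without bound (RecursionError) unless it happens to hit an early direct match, and B's
-- reachability phase itself raises or diverges on exactly that cup data.
def Pre_ambiguousMeasurements (measuringCups : List (List Int)) (low : Int) (high : Int) (cached : Option (List (String × Bool))) : Prop :=
  (PySem.Dict.contains (PySem.Dict.ofList (cached.getD [])) (pvKey low high) = true)
  ∨ high ≤ 0
  ∨ (∀ cup ∈ measuringCups, 2 ≤ cup.length ∧ 1 ≤ (PySem.List.pyGet? cup 1).getD 0)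
instance (measuringCups : List (List Int)) (low : Int) (high : Int) (cached : Option (List (String × Bool))) : Decidable (Pre_ambiguousMeasurements measuringCups low high cached) := by unfold Pre_ambiguousMeasurements; infer_instance

def pvWitness_ambiguousMeasurements : List (List Int) × Int × Int × (Option (List (String × Bool))) :=
  ([[3, 1], [1, 2]], 2, 5, none)

def Spec_ambiguousMeasurements (measuringCups : List (List Int)) (low : Int) (high : Int) (cached : Option (List (String × Bool))) (out : Bool) : Prop := out = ambiguousMeasurements_alt measuringCups low high cached
instance (measuringCups : List (List Int)) (low : Int) (high : Int) (cached : Option (List (String × Bool))) (out : Bool) : Decidable (Spec_ambiguousMeasurements measuringCups low high cached out) := by unfold Spec_ambiguousMeasurements; infer_instance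

-- ===== CLAIM (what is proved, stated in full; the proofs are below) =====
def Claim_equal_ambiguousMeasurements : Prop := ∀ (measuringCups : List (List Int)) (low : Int) (high : Int) (cached : Option (List (String × Bool))), Dom_ambiguousMeasurements measuringCups low high cached → Pre_ambiguousMeasurements measuringCups low high cached → Spec_ambiguousMeasurements measuringCups low high cached (ambiguousMeasurements measuringCups low high cached)

-- ===== LEMMAS AND PROOFS =====

-- the common specification function: the value A and B both compute, by fuelled recursion
def pvF (cups : List (List Int)) (d0 : PySem.Dict String Bool) : Nat → Int → Int → Bool
  | 0, _, _ => false
  | f + 1, lo, hi =>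
    match PySem.Dict.get? d0 (pvKey lo hi) with
    | some b => b
    | none =>
      if hi ≤ 0 then false
      else cups.any fun cup =>
        (decide (pvCup cup 0 ≥ lo) && decide (hi ≥ pvCup cup 1)) ||
        pvF cups d0 f (lo - pvCup cup 0) (hi - pvCup cup 1)

def pvL (cups : List (List Int)) (d0 : PySem.Dict String Bool) (lo hi : Int) : Bool :=
  pvF cups d0 (hi.toNat + 1) lo hi

def pvGood (cups : List (List Int)) : Prop :=
  ∀ cup ∈ cups, 2 ≤ cup.length ∧ 1 ≤ (PySem.List.pyGet? cup 1).getD 0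

-- ---- key injectivity ----
theorem pvToDigitsCore_eq : ∀ (f n : Nat) (acc : List Char), n < f →
    Nat.toDigitsCore 10 f n acc =
      (if n = 0 then ['0'] else ((Nat.digits 10 n).map Nat.digitChar).reverse) ++ acc := by
  intro f
  induction f with
  | zero => intro n acc h; omega
  | succ f ih =>
    intro n acc h
    by_cases h0 : n = 0
    · subst h0; simp [Nat.toDigitsCore]; decide
    · by_cases hd : n / 10 = 0
      · have hn10 : n < 10 := by omega
        rw [Nat.digits_def' (by norm_num : 1 < 10) (Nat.pos_of_ne_zero h0)]
        rw [hd, Nat.digits_zero]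
        have hmod : n % 10 = n := Nat.mod_eq_of_lt hn10
        simp [Nat.toDigitsCore, hd, h0, hmod]
      · have hrec : Nat.toDigitsCore 10 (f + 1) n acc =
            Nat.toDigitsCore 10 f (n / 10) (Nat.digitChar (n % 10) :: acc) := by
          simp [Nat.toDigitsCore, hd]
        rw [hrec, ih (n / 10) _ (by
          have : n / 10 < n := Nat.div_lt_self (Nat.pos_of_ne_zero h0) (by norm_num)
          omega)]
        rw [Nat.digits_def' (by norm_num : 1 < 10) (Nat.pos_of_ne_zero h0)]
        simp [hd, h0, List.append_assoc]

theorem pvDigitChar_mem (m : Nat) (h : m < 10) :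
    Nat.digitChar m ∈ ['0','1','2','3','4','5','6','7','8','9'] := by
  interval_cases m <;> decide

theorem pvToDigits_chars (n : Nat) : ∀ c ∈ Nat.toDigits 10 n, c ∈ ['0','1','2','3','4','5','6','7','8','9'] := by
  intro c hc
  rw [Nat.toDigits, pvToDigitsCore_eq (n + 1) n [] (by omega)] at hc
  by_cases h0 : n = 0
  · simp [h0] at hc; simp [hc]
  · simp only [if_neg h0, List.append_nil, List.mem_reverse, List.mem_map] at hc
    obtain ⟨d, hd, rfl⟩ := hc
    exact pvDigitChar_mem d (Nat.digits_lt_base (by norm_num) hd)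

theorem pvDigitChar_inj {a b : Nat} (ha : a < 10) (hb : b < 10)
    (h : Nat.digitChar a = Nat.digitChar b) : a = b := by
  interval_cases a <;> interval_cases b <;> first | rfl | (exfalso; revert h; decide)

theorem pvMapDigitChar_inj : ∀ (l1 l2 : List Nat), (∀ x ∈ l1, x < 10) → (∀ x ∈ l2, x < 10) →
    l1.map Nat.digitChar = l2.map Nat.digitChar → l1 = l2 := by
  intro l1
  induction l1 with
  | nil => intro l2 _ _ h; cases l2 <;> simp_all
  | cons a t ih =>
    intro l2 h1 h2 h
    cases l2 with
    | nil => simp_all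
    | cons b t2 =>
      simp only [List.map_cons, List.cons.injEq] at h
      have hab := pvDigitChar_inj (h1 a List.mem_cons_self) (h2 b List.mem_cons_self) h.1
      have hts := ih t2 (fun x hx => h1 x (List.mem_cons_of_mem _ hx))
        (fun x hx => h2 x (List.mem_cons_of_mem _ hx)) h.2
      simp [hab, hts]

theorem pvToDigits_ne_zero_inj (p q : Nat) (hp : p ≠ 0)
    (hpq : (if p = 0 then ['0'] else ((Nat.digits 10 p).map Nat.digitChar).reverse) =
      (if q = 0 then ['0'] else ((Nat.digits 10 q).map Nat.digitChar).reverse)) : p = q := by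
  by_cases hq : q = 0
  · subst hq
    simp only [if_neg hp, if_pos] at hpq
    have h1 : ((Nat.digits 10 p).map Nat.digitChar).reverse.length = 1 := by rw [hpq]; rfl
    simp only [List.length_reverse, List.length_map] at h1
    obtain ⟨d, hd⟩ := List.length_eq_one_iff.mp h1
    rw [hd] at hpq
    simp only [List.map_cons, List.map_nil, List.reverse_cons, List.reverse_nil,
      List.nil_append, List.cons.injEq] at hpq
    have hd10 : d < 10 := Nat.digits_lt_base (by norm_num) (by rw [hd]; exact List.mem_cons_self)
    have hdz : d = 0 := pvDigitChar_inj hd10 (by norm_num) (by simpa using hpq.1)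
    have hofd := congrArg (Nat.ofDigits 10) hd
    rw [Nat.ofDigits_digits, hdz] at hofd
    simpa using hofd
  · simp only [if_neg hp, if_neg hq] at hpq
    have hrev := List.reverse_injective hpq
    have hdig := pvMapDigitChar_inj _ _
      (fun x hx => Nat.digits_lt_base (by norm_num) hx)
      (fun x hx => Nat.digits_lt_base (by norm_num) hx) hrev
    have hofd := congrArg (Nat.ofDigits 10) hdig
    rwa [Nat.ofDigits_digits, Nat.ofDigits_digits] at hofd

theorem pvToDigits_inj (n m : Nat) (h : Nat.toDigits 10 n = Nat.toDigits 10 m) : n = m := by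
  rw [Nat.toDigits, Nat.toDigits, pvToDigitsCore_eq (n + 1) n [] (by omega),
    pvToDigitsCore_eq (m + 1) m [] (by omega), List.append_nil, List.append_nil] at h
  by_cases hn : n = 0
  · by_cases hm : m = 0
    · omega
    · exact (pvToDigits_ne_zero_inj m n hm h.symm).symm
  · exact pvToDigits_ne_zero_inj n m hn h

theorem pvToChars_chars (n : Int) : ∀ c ∈ PySem.Int.toChars n, c ≠ ':' := by
  intro c hc
  by_cases hn : n < 0 <;> simp only [PySem.Int.toChars, hn, if_pos, if_false] at hc
  · rcases List.mem_cons.mp hc with rfl | hc2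
    · decide
    · have := pvToDigits_chars _ c hc2
      fin_cases this <;> decide
  · have := pvToDigits_chars _ c hc
    fin_cases this <;> decide

theorem pvToChars_inj (n m : Int) (h : PySem.Int.toChars n = PySem.Int.toChars m) : n = m := by
  by_cases hn : n < 0 <;> by_cases hm : m < 0 <;>
    simp only [PySem.Int.toChars, hn, hm, if_pos, if_false] at h
  · have h2 : Nat.toDigits 10 n.natAbs = Nat.toDigits 10 m.natAbs := (List.cons.injEq _ _ _ _ ▸ h).2
    have := pvToDigits_inj _ _ h2
    omega
  · exfalso
    have hmem : '-' ∈ Nat.toDigits 10 m.toNat := h ▸ List.mem_cons_self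
    exact absurd (pvToDigits_chars _ '-' hmem) (by decide)
  · exfalso
    have hmem : '-' ∈ Nat.toDigits 10 n.toNat := h.symm ▸ List.mem_cons_self
    exact absurd (pvToDigits_chars _ '-' hmem) (by decide)
  · have := pvToDigits_inj _ _ h
    omega

theorem pvSplit_unique {c : Char} : ∀ (a a' b b' : List Char), c ∉ a → c ∉ a' →
    a ++ c :: b = a' ++ c :: b' → a = a' ∧ b = b' := by
  intro a
  induction a with
  | nil =>
    intro a' b b' _ ha' h
    cases a' with
    | nil => simpa using h
    | cons x t =>
      simp only [List.nil_append, List.cons_append, List.cons.injEq] at h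
      exact absurd (h.1 ▸ List.mem_cons_self) ha'
  | cons x t ih =>
    intro a' b b' ha ha' h
    cases a' with
    | nil =>
      simp only [List.cons_append, List.nil_append, List.cons.injEq] at h
      exact absurd (h.1.symm ▸ List.mem_cons_self) ha
    | cons y t' =>
      simp only [List.cons_append, List.cons.injEq] at h
      obtain ⟨rfl, h2⟩ := h
      have := ih t' b b' (fun hm => ha (List.mem_cons_of_mem _ hm)) (fun hm => ha' (List.mem_cons_of_mem _ hm)) h2
      exact ⟨by rw [this.1], this.2⟩

theorem pvKey_inj {lo hi lo' hi' : Int} (h : pvKey lo hi = pvKey lo' hi') : lo = lo' ∧ hi = hi' := by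
  have h' := congrArg String.toList h
  simp only [pvKey, String.toList_append, PySem.Int.toList_toStr] at h'
  have hcolon : (":" : String).toList = [':'] := rfl
  rw [hcolon] at h'
  simp only [List.singleton_append, List.append_assoc] at h'
  have hsplit := pvSplit_unique (PySem.Int.toChars lo) (PySem.Int.toChars lo')
    (PySem.Int.toChars hi) (PySem.Int.toChars hi')
    (fun hm => pvToChars_chars lo ':' hm rfl) (fun hm => pvToChars_chars lo' ':' hm rfl) h'
  exact ⟨pvToChars_inj _ _ hsplit.1, pvToChars_inj _ _ hsplit.2⟩

theorem pvAny_congr {α : Type} {l : List α} {f g : α → Bool} (h : ∀ x ∈ l, f x = g x) :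
    l.any f = l.any g := by
  induction l with
  | nil => rfl
  | cons a t ih =>
    simp [List.any_cons, h a List.mem_cons_self, ih (fun x hx => h x (List.mem_cons_of_mem _ hx))]

-- ---- fuel independence of pvF ----
theorem pvF_fuel (cups : List (List Int)) (d0 : PySem.Dict String Bool) (hg : pvGood cups) :
    ∀ (k : Nat) (lo hi : Int) (f f' : Nat), hi.toNat ≤ k → hi.toNat < f → hi.toNat < f' →
      pvF cups d0 f lo hi = pvF cups d0 f' lo hi := by
  intro k
  induction k using Nat.strong_induction_on with
  | _ k ih =>
    intro lo hi f f' hk hf hf'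
    obtain ⟨g, rfl⟩ : ∃ g, f = g + 1 := ⟨f - 1, by omega⟩
    obtain ⟨g', rfl⟩ : ∃ g', f' = g' + 1 := ⟨f' - 1, by omega⟩
    simp only [pvF]
    rcases hget : PySem.Dict.get? d0 (pvKey lo hi) with _ | b
    case some => simp only [hget]
    simp only [hget]
    by_cases hhi : hi ≤ 0
    · simp [hhi]
    · simp only [if_neg hhi]
      apply pvAny_congr
      intro cup hcup
      have hc1 : 1 ≤ pvCup cup 1 := (hg cup hcup).2
      congr 1
      exact ih (hi - pvCup cup 1).toNat (by omega) _ _ g g' (le_refl _) (by omega) (by omega)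

theorem pvL_eq (cups : List (List Int)) (d0 : PySem.Dict String Bool) (hg : pvGood cups)
    (f : Nat) (lo hi : Int) (hf : hi.toNat < f) : pvF cups d0 f lo hi = pvL cups d0 lo hi :=
  pvF_fuel cups d0 hg hi.toNat lo hi f (hi.toNat + 1) (le_refl _) hf (by omega)

-- the per-cup test of one unfolding of pvL
def pvP (cups : List (List Int)) (d0 : PySem.Dict String Bool) (lo hi : Int) (cup : List Int) : Bool :=
  (decide (pvCup cup 0 ≥ lo) && decide (hi ≥ pvCup cup 1)) ||
  pvL cups d0 (lo - pvCup cup 0) (hi - pvCup cup 1)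

-- one unfolding of pvL at an unresolved state
theorem pvL_step (cups : List (List Int)) (d0 : PySem.Dict String Bool) (hg : pvGood cups)
    (lo hi : Int) (hmiss : PySem.Dict.get? d0 (pvKey lo hi) = none) (hpos : 0 < hi) :
    pvL cups d0 lo hi = cups.any (pvP cups d0 lo hi) := by
  unfold pvL
  simp only [pvF, hmiss, if_neg (by omega : ¬ hi ≤ 0)]
  apply pvAny_congr
  intro cup hcup
  have hc1 : 1 ≤ pvCup cup 1 := (hg cup hcup).2
  simp only [pvP]
  congr 1
  exact pvL_eq cups d0 hg hi.toNat _ _ (by omega)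

-- ---- A computes pvL ----
def pvInv (cups : List (List Int)) (d0 d : PySem.Dict String Bool) : Prop :=
  (∀ k b, PySem.Dict.get? d0 k = some b → PySem.Dict.get? d k = some b) ∧
  (∀ lo hi b, PySem.Dict.get? d (pvKey lo hi) = some b → b = pvL cups d0 lo hi)

def pvAddsLE (hi : Int) (d d' : PySem.Dict String Bool) : Prop :=
  ∀ k b, PySem.Dict.get? d' k = some b →
    PySem.Dict.get? d k = some b ∨ ∃ lo' hi', k = pvKey lo' hi' ∧ hi' ≤ hi

theorem pvInv_miss {cups : List (List Int)} {d0 d : PySem.Dict String Bool} {k : String}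
    (hinv : pvInv cups d0 d) (hmiss : PySem.Dict.get? d k = none) :
    PySem.Dict.get? d0 k = none := by
  rcases hg0 : PySem.Dict.get? d0 k with _ | b
  · rfl
  · rw [hinv.1 _ _ hg0] at hmiss; exact absurd hmiss (by simp)

theorem pvInv_insert {cups : List (List Int)} {d0 d : PySem.Dict String Bool} {lo hi : Int} {v : Bool}
    (hinv : pvInv cups d0 d) (hd0 : PySem.Dict.get? d0 (pvKey lo hi) = none)
    (hv : v = pvL cups d0 lo hi) :
    pvInv cups d0 (PySem.Dict.insert d (pvKey lo hi) v) := by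
  constructor
  · intro k b hb
    rw [PySem.Dict.get?_insert, if_neg (by rintro rfl; rw [hd0] at hb; exact absurd hb (by simp))]
    exact hinv.1 _ _ hb
  · intro lo' hi' b hb
    rw [PySem.Dict.get?_insert] at hb
    by_cases hkk : pvKey lo' hi' = pvKey lo hi
    · rw [if_pos hkk] at hb
      obtain ⟨rfl, rfl⟩ := pvKey_inj hkk
      cases hb; exact hv
    · rw [if_neg hkk] at hb
      exact hinv.2 _ _ _ hb

theorem pvAddsLE_insert {d d' : PySem.Dict String Bool} {lo hi hic : Int} {v : Bool}
    (hle : hic ≤ hi) (hadd : pvAddsLE hic d d') :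
    pvAddsLE hi d (PySem.Dict.insert d' (pvKey lo hi) v) := by
  intro k b hb
  rw [PySem.Dict.get?_insert] at hb
  by_cases hkk : k = pvKey lo hi
  · exact Or.inr ⟨lo, hi, hkk, le_refl _⟩
  · rw [if_neg hkk] at hb
    rcases hadd _ _ hb with hl | ⟨lo', hi', hk2, hle'⟩
    · exact Or.inl hl
    · exact Or.inr ⟨lo', hi', hk2, by omega⟩

theorem pvLoopA_correct (cups : List (List Int)) (d0 : PySem.Dict String Bool) (hg : pvGood cups)
    (f : Nat)
    (IH : ∀ (lo hi : Int) (d : PySem.Dict String Bool), hi.toNat < f → pvInv cups d0 d →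
      (pvGoA cups f lo hi d).1 = pvL cups d0 lo hi ∧ pvInv cups d0 (pvGoA cups f lo hi d).2 ∧
      pvAddsLE hi d (pvGoA cups f lo hi d).2) :
    ∀ (rest : List (List Int)) (lo hi : Int) (d : PySem.Dict String Bool),
      (∀ cup ∈ rest, cup ∈ cups) → hi.toNat ≤ f → 0 < hi →
      PySem.Dict.get? d (pvKey lo hi) = none → pvInv cups d0 d →
      cups.any (pvP cups d0 lo hi) = rest.any (pvP cups d0 lo hi) →
      (pvLoopA cups rest f lo hi d).1 = rest.any (pvP cups d0 lo hi) ∧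
      pvInv cups d0 (pvLoopA cups rest f lo hi d).2 ∧
      pvAddsLE hi d (pvLoopA cups rest f lo hi d).2 := by
  intro rest
  induction rest with
  | nil =>
    intro lo hi d _ _ hpos hmiss hinv hany
    have hd0 := pvInv_miss hinv hmiss
    have hval : pvL cups d0 lo hi = false := by
      rw [pvL_step cups d0 hg lo hi hd0 hpos, hany, List.any_nil]
    simp only [pvLoopA, List.any_nil]
    refine ⟨by trivial, pvInv_insert hinv hd0 hval.symm, ?_⟩
    intro k b hb
    rw [PySem.Dict.get?_insert] at hb
    by_cases hkk : k = pvKey lo hi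
    · exact Or.inr ⟨lo, hi, hkk, le_refl _⟩
    · rw [if_neg hkk] at hb; exact Or.inl hb
  | cons cup rs ihrest =>
    intro lo hi d hsub hk hpos hmiss hinv hany
    have hcupc : cup ∈ cups := hsub cup List.mem_cons_self
    have hc1 : 1 ≤ pvCup cup 1 := (hg cup hcupc).2
    have hd0 := pvInv_miss hinv hmiss
    have hstep := pvL_step cups d0 hg lo hi hd0 hpos
    simp only [pvLoopA]
    by_cases hdir : pvCup cup 0 ≥ lo ∧ hi ≥ pvCup cup 1
    · simp only [if_pos hdir]
      have hpcup : pvP cups d0 lo hi cup = true := by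
        simp [pvP, hdir.1, hdir.2]
      have hval : pvL cups d0 lo hi = true := by
        rw [hstep]; exact List.any_eq_true.mpr ⟨cup, hcupc, hpcup⟩
      refine ⟨by simp [List.any_cons, hpcup], pvInv_insert hinv hd0 hval.symm, ?_⟩
      intro k b hb
      rw [PySem.Dict.get?_insert] at hb
      by_cases hkk : k = pvKey lo hi
      · exact Or.inr ⟨lo, hi, hkk, le_refl _⟩
      · rw [if_neg hkk] at hb; exact Or.inl hb
    · simp only [if_neg hdir]
      have hchild : (hi - pvCup cup 1).toNat < f := by omega
      obtain ⟨hr1, hrinv, hradd⟩ := IH (lo - pvCup cup 0) (hi - pvCup cup 1) d hchild hinv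
      by_cases hb : (pvGoA cups f (lo - pvCup cup 0) (hi - pvCup cup 1) d).1 = true
      · simp only [hb, if_true]
        have hplc : pvL cups d0 (lo - pvCup cup 0) (hi - pvCup cup 1) = true := hr1.symm.trans hb
        have hpcup : pvP cups d0 lo hi cup = true := by simp [pvP, hplc]
        have hval : pvL cups d0 lo hi = true := by
          rw [hstep]; exact List.any_eq_true.mpr ⟨cup, hcupc, hpcup⟩
        refine ⟨by simp [List.any_cons, hpcup], pvInv_insert hrinv hd0 hval.symm,
          pvAddsLE_insert (by omega) hradd⟩
      · have hbf : (pvGoA cups f (lo - pvCup cup 0) (hi - pvCup cup 1) d).1 = false := by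
          simpa using hb
        simp only [hbf, Bool.false_eq_true, if_false]
        have hplc : pvL cups d0 (lo - pvCup cup 0) (hi - pvCup cup 1) = false := hr1.symm.trans hbf
        have hpcupf : pvP cups d0 lo hi cup = false := by
          simp only [pvP, hplc, Bool.or_false]
          rw [← Bool.decide_and]
          exact decide_eq_false hdir
        have hany' : List.any cups (pvP cups d0 lo hi) = List.any rs (pvP cups d0 lo hi) := by
          rw [hany]; simp [List.any_cons, hpcupf]
        have hmiss2 : PySem.Dict.get? (pvGoA cups f (lo - pvCup cup 0) (hi - pvCup cup 1) d).2 (pvKey lo hi) = none := by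
          rcases hgr : PySem.Dict.get? (pvGoA cups f (lo - pvCup cup 0) (hi - pvCup cup 1) d).2 (pvKey lo hi) with _ | b2
          · rfl
          · rcases hradd _ _ hgr with hleft | ⟨lo', hi', hkeq, hle⟩
            · rw [hmiss] at hleft; exact absurd hleft (by simp)
            · obtain ⟨-, rfl⟩ := pvKey_inj hkeq
              omega
        obtain ⟨h1, h2, h3⟩ := ihrest lo hi _ (fun c hc => hsub c (List.mem_cons_of_mem _ hc))
          hk hpos hmiss2 hrinv hany'
        refine ⟨by simp [List.any_cons, hpcupf, h1], h2, ?_⟩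
        intro k b hkb
        rcases h3 k b hkb with hl | hr2
        · rcases hradd k b hl with hll | ⟨lo', hi', hk2, hle⟩
          · exact Or.inl hll
          · exact Or.inr ⟨lo', hi', hk2, by omega⟩
        · rcases hr2 with ⟨lo', hi', hk2, hle⟩
          exact Or.inr ⟨lo', hi', hk2, hle⟩

theorem pvGoA_correct (cups : List (List Int)) (d0 : PySem.Dict String Bool) (hg : pvGood cups) :
    ∀ (f : Nat) (lo hi : Int) (d : PySem.Dict String Bool), hi.toNat < f → pvInv cups d0 d →
      (pvGoA cups f lo hi d).1 = pvL cups d0 lo hi ∧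
      pvInv cups d0 (pvGoA cups f lo hi d).2 ∧
      pvAddsLE hi d (pvGoA cups f lo hi d).2 := by
  intro f
  induction f with
  | zero => intro lo hi d hf _; exact absurd hf (by omega)
  | succ f ih =>
    intro lo hi d hf hinv
    simp only [pvGoA]
    rcases hget : PySem.Dict.get? d (pvKey lo hi) with _ | b
    · simp only [hget]
      by_cases hhi : hi ≤ 0
      · simp only [if_pos hhi]
        have hd0 := pvInv_miss hinv hget
        refine ⟨?_, hinv, fun k b hb => Or.inl hb⟩
        simp [pvL, pvF, hd0, hhi]
      · simp only [if_neg hhi]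
        have hloop := pvLoopA_correct cups d0 hg f ih cups lo hi d (fun c hc => hc)
          (by omega) (by omega) hget hinv rfl
        have hstep := pvL_step cups d0 hg lo hi (pvInv_miss hinv hget) (by omega)
        exact ⟨hloop.1.trans hstep.symm, hloop.2.1, hloop.2.2⟩
    · simp only [hget]
      exact ⟨hinv.2 _ _ _ hget, hinv, fun k b hb => Or.inl hb⟩

-- ---- B computes pvL ----

-- what one BFS inner scan (one frontier state) guarantees
theorem pvScan_spec (s : Int × Int) :
    ∀ (cups : List (List Int)) (acc : PySem.Set (Int × Int) × List (Int × Int)),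
      (∀ x ∈ acc.2, x ∈ acc.1) →
      (∀ x ∈ acc.1, x ∈ (pvScan cups acc s).1) ∧
      (∀ x ∈ (pvScan cups acc s).1, x ∈ acc.1 ∨ x ∈ (pvScan cups acc s).2) ∧
      (∀ x ∈ acc.2, x ∈ (pvScan cups acc s).2) ∧
      (∀ x ∈ (pvScan cups acc s).2, x ∈ acc.2 ∨
        ∃ cup ∈ cups, x = (s.1 - pvCup cup 0, s.2 - pvCup cup 1)) ∧
      (∀ cup ∈ cups, (s.1 - pvCup cup 0, s.2 - pvCup cup 1) ∈ (pvScan cups acc s).1) ∧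
      (acc.1.Nodup → (pvScan cups acc s).1.Nodup) ∧
      (∀ x ∈ (pvScan cups acc s).2, x ∈ (pvScan cups acc s).1) := by
  intro cups
  induction cups with
  | nil =>
    intro acc hacc
    simp only [pvScan, List.foldl_nil]
    exact ⟨fun x hx => hx, fun x hx => Or.inl hx, fun x hx => hx,
      fun x hx => Or.inl hx, by simp, fun h => h, hacc⟩
  | cons c rest ih =>
    intro acc hacc
    have hunf : pvScan (c :: rest) acc s = pvScan rest
        (if PySem.Set.contains acc.1 (s.1 - pvCup c 0, s.2 - pvCup c 1) then acc
         else (PySem.Set.add acc.1 (s.1 - pvCup c 0, s.2 - pvCup c 1),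
               acc.2 ++ [(s.1 - pvCup c 0, s.2 - pvCup c 1)])) s := by
      simp only [pvScan, List.foldl_cons]
    by_cases hc : PySem.Set.contains acc.1 (s.1 - pvCup c 0, s.2 - pvCup c 1) = true
    · rw [hunf, if_pos hc]
      obtain ⟨p1, p2, p3, p4, p5, p6, p7⟩ := ih acc hacc
      refine ⟨p1, p2, p3, fun x hx => (p4 x hx).imp_right
        (fun ⟨cup, hcup, he⟩ => ⟨cup, List.mem_cons_of_mem _ hcup, he⟩), ?_, p6, p7⟩
      intro cup hcup
      rcases List.mem_cons.mp hcup with rfl | hcup2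
      · exact p1 _ ((PySem.Set.contains_iff _ _).mp hc)
      · exact p5 cup hcup2
    · rw [hunf, if_neg hc]
      have hc2 : (s.1 - pvCup c 0, s.2 - pvCup c 1) ∉ acc.1 := fun hm => hc ((PySem.Set.contains_iff _ _).mpr hm)
      obtain ⟨p1, p2, p3, p4, p5, p6, p7⟩ := ih
        (PySem.Set.add acc.1 (s.1 - pvCup c 0, s.2 - pvCup c 1),
         acc.2 ++ [(s.1 - pvCup c 0, s.2 - pvCup c 1)])
        (by
          intro x hx
          rcases List.mem_append.mp hx with hx1 | hx1
          · exact (PySem.Set.mem_add _ _ _).mpr (Or.inl (hacc x hx1))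
          · simp only [List.mem_singleton] at hx1
            exact (PySem.Set.mem_add _ _ _).mpr (Or.inr hx1))
      refine ⟨?_, ?_, ?_, ?_, ?_, ?_, p7⟩
      · intro x hx; exact p1 x ((PySem.Set.mem_add _ _ _).mpr (Or.inl hx))
      · intro x hx
        rcases p2 x hx with hx1 | hx1
        · rcases (PySem.Set.mem_add _ _ _).mp hx1 with hx2 | rfl
          · exact Or.inl hx2
          · exact Or.inr (p3 _ (List.mem_append.mpr (Or.inr (List.mem_singleton_self _))))
        · exact Or.inr hx1
      · intro x hx; exact p3 x (List.mem_append.mpr (Or.inl hx))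
      · intro x hx
        rcases p4 x hx with hx1 | hx1
        · rcases List.mem_append.mp hx1 with hx2 | hx2
          · exact Or.inl hx2
          · simp only [List.mem_singleton] at hx2
            exact Or.inr ⟨c, List.mem_cons_self, hx2⟩
        · obtain ⟨cup, hcup, he⟩ := hx1
          exact Or.inr ⟨cup, List.mem_cons_of_mem _ hcup, he⟩
      · intro cup hcup
        rcases List.mem_cons.mp hcup with rfl | hcup2
        · exact p1 _ ((PySem.Set.mem_add _ _ _).mpr (Or.inr rfl))
        · exact p5 cup hcup2
      · intro hnd; exact p6 (PySem.Set.nodup_add _ _ hnd)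

-- what the whole BFS guarantees: the result contains `seen` and is closed under expansion
theorem pvBfs_spec (cups : List (List Int)) (d0 : PySem.Dict String Bool) (hg : pvGood cups) :
    ∀ (f : Nat) (frontier : List (Int × Int)) (seen : PySem.Set (Int × Int)),
      (∀ x ∈ frontier, x ∈ seen) →
      (∀ x ∈ seen, pvSkip d0 x = false →
        (∀ cup ∈ cups, (x.1 - pvCup cup 0, x.2 - pvCup cup 1) ∈ seen) ∨ x ∈ frontier) →
      (∀ x ∈ frontier, 0 < x.2 → x.2.toNat < f) →
      seen.Nodup →
      (∀ x ∈ seen, x ∈ pvBfs cups d0 f frontier seen) ∧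
      (∀ x ∈ pvBfs cups d0 f frontier seen, pvSkip d0 x = false →
        ∀ cup ∈ cups, (x.1 - pvCup cup 0, x.2 - pvCup cup 1) ∈ pvBfs cups d0 f frontier seen) ∧
      (pvBfs cups d0 f frontier seen).Nodup := by
  intro f
  induction f with
  | zero =>
    intro frontier seen h1 h2 h3 h4
    simp only [pvBfs]
    refine ⟨fun x hx => hx, ?_, h4⟩
    intro x hx hskip
    rcases h2 x hx hskip with hcl | hfr
    · exact hcl
    · have hpos : 0 < x.2 := by
        by_contra hle
        simp [pvSkip] at hskip
        omega
      exact absurd (h3 x hfr hpos) (by omega)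
  | succ f ih =>
    intro frontier seen h1 h2 h3 h4
    by_cases hemp : frontier.isEmpty
    · simp only [pvBfs, hemp, if_true]
      refine ⟨fun x hx => hx, ?_, h4⟩
      intro x hx hskip
      rcases h2 x hx hskip with hcl | hfr
      · exact hcl
      · rw [List.isEmpty_iff] at hemp
        simp [hemp] at hfr
    · simp only [pvBfs, hemp, if_false, Bool.false_eq_true]
      -- the round fold over the frontier
      have hfold : ∀ (fr : List (Int × Int)) (acc : PySem.Set (Int × Int) × List (Int × Int)),
          (∀ x ∈ acc.2, x ∈ acc.1) →
          (∀ x ∈ acc.1, x ∈ (fr.foldl (fun a t => if pvSkip d0 t then a else pvScan cups a t) acc).1) ∧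
          (∀ x ∈ (fr.foldl (fun a t => if pvSkip d0 t then a else pvScan cups a t) acc).1,
            x ∈ acc.1 ∨ x ∈ (fr.foldl (fun a t => if pvSkip d0 t then a else pvScan cups a t) acc).2) ∧
          (∀ x ∈ acc.2, x ∈ (fr.foldl (fun a t => if pvSkip d0 t then a else pvScan cups a t) acc).2) ∧
          (∀ x ∈ (fr.foldl (fun a t => if pvSkip d0 t then a else pvScan cups a t) acc).2,
            x ∈ acc.2 ∨ ∃ t ∈ fr, pvSkip d0 t = false ∧
              ∃ cup ∈ cups, x = (t.1 - pvCup cup 0, t.2 - pvCup cup 1)) ∧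
          (∀ t ∈ fr, pvSkip d0 t = false → ∀ cup ∈ cups,
            (t.1 - pvCup cup 0, t.2 - pvCup cup 1) ∈ (fr.foldl (fun a t => if pvSkip d0 t then a else pvScan cups a t) acc).1) ∧
          (acc.1.Nodup → (fr.foldl (fun a t => if pvSkip d0 t then a else pvScan cups a t) acc).1.Nodup) ∧
          (∀ x ∈ (fr.foldl (fun a t => if pvSkip d0 t then a else pvScan cups a t) acc).2,
            x ∈ (fr.foldl (fun a t => if pvSkip d0 t then a else pvScan cups a t) acc).1) := by
        intro fr
        induction fr with
        | nil =>
          intro acc hacc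
          simp only [List.foldl_nil]
          exact ⟨fun x hx => hx, fun x hx => Or.inl hx, fun x hx => hx,
            fun x hx => Or.inl hx, by simp, fun h => h, hacc⟩
        | cons t ts ihf =>
          intro acc hacc
          simp only [List.foldl_cons]
          by_cases hsk : pvSkip d0 t = true
          · simp only [hsk, if_true]
            obtain ⟨q1, q2, q3, q4, q5, q6, q7⟩ := ihf acc hacc
            refine ⟨q1, q2, q3, ?_, ?_, q6, q7⟩
            · intro x hx
              exact (q4 x hx).imp_right (fun ⟨t', ht', hp⟩ => ⟨t', List.mem_cons_of_mem _ ht', hp⟩)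
            · intro t' ht' hskip'
              rcases List.mem_cons.mp ht' with rfl | ht2
              · rw [hsk] at hskip'; exact absurd hskip' (by simp)
              · exact q5 t' ht2 hskip'
          · have hsk2 : pvSkip d0 t = false := by simpa using hsk
            simp only [hsk2, Bool.false_eq_true, if_false]
            obtain ⟨s1, s2, s3, s4, s5, s6, s7⟩ := pvScan_spec t cups acc hacc
            obtain ⟨q1, q2, q3, q4, q5, q6, q7⟩ := ihf (pvScan cups acc t) s7
            refine ⟨?_, ?_, ?_, ?_, ?_, ?_, q7⟩
            · intro x hx; exact q1 x (s1 x hx)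
            · intro x hx
              rcases q2 x hx with hx1 | hx1
              · rcases s2 x hx1 with hx2 | hx2
                · exact Or.inl hx2
                · exact Or.inr (q3 x hx2)
              · exact Or.inr hx1
            · intro x hx; exact q3 x (s3 x hx)
            · intro x hx
              rcases q4 x hx with hx1 | hx1
              · rcases s4 x hx1 with hx2 | hx2
                · exact Or.inl hx2
                · exact Or.inr ⟨t, List.mem_cons_self, hsk2, hx2⟩
              · obtain ⟨t', ht', hp⟩ := hx1
                exact Or.inr ⟨t', List.mem_cons_of_mem _ ht', hp⟩
            · intro t' ht' hskip'
              rcases List.mem_cons.mp ht' with rfl | ht2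
              · intro cup hcup
                exact q1 _ (s5 cup hcup)
              · exact q5 t' ht2 hskip'
            · intro hnd; exact q6 (s6 hnd)
      obtain ⟨c1, c2, c3, c4, c5, c6, c7⟩ := hfold frontier (seen, []) (by simp)
      have hskip_pos : ∀ t : Int × Int, pvSkip d0 t = false → 0 < t.2 := by
        intro t ht
        simp only [pvSkip, Bool.or_eq_false_iff, decide_eq_false_iff_not] at ht
        omega
      obtain ⟨i1, i2, i3⟩ := ih
        (frontier.foldl (fun a t => if pvSkip d0 t then a else pvScan cups a t) (seen, [])).2
        (frontier.foldl (fun a t => if pvSkip d0 t then a else pvScan cups a t) (seen, [])).1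
        c7
        (by
          intro x hx hskip
          rcases c2 x hx with hx1 | hx1
          · rcases h2 x hx1 hskip with hcl | hfr
            · exact Or.inl (fun cup hcup => c1 _ (hcl cup hcup))
            · exact Or.inl (c5 x hfr hskip)
          · exact Or.inr hx1)
        (by
          intro x hx _
          rcases c4 x hx with hx1 | ⟨t, htf, hts, cup, hcup, rfl⟩
          · simp at hx1
          · have hpos := hskip_pos t hts
            have hfu := h3 t htf hpos
            have hcc : 1 ≤ pvCup cup 1 := (hg cup hcup).2
            omega)
        (c6 h4)
      exact ⟨fun x hx => i1 x (c1 x hx), i2, i3⟩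

-- the evaluation loop of B fills the table with pvL, bottom-up in hi
theorem pvEval_go (cups : List (List Int)) (d0 : PySem.Dict String Bool) (hg : pvGood cups)
    (L : List (Int × Int)) (hpair : L.Pairwise (fun a b => a.2 ≤ b.2))
    (hclosed : ∀ s ∈ L, PySem.Dict.get? d0 (pvKey s.1 s.2) = none → 0 < s.2 →
      ∀ cup ∈ cups, (s.1 - pvCup cup 0, s.2 - pvCup cup 1) ∈ L) :
    ∀ (S Q : List (Int × Int)) (val : PySem.Dict (Int × Int) Bool),
      L = Q ++ S →
      (∀ s : Int × Int, PySem.Dict.get? val s = if s ∈ Q then some (pvL cups d0 s.1 s.2) else none) →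
      ∀ s : Int × Int,
        PySem.Dict.get? (S.foldl (fun val s =>
          PySem.Dict.insert val s
            (match PySem.Dict.get? d0 (pvKey s.1 s.2) with
             | some b => b
             | none =>
               if s.2 ≤ 0 then false
               else cups.any (fun cup =>
                 (decide (pvCup cup 0 ≥ s.1) && decide (s.2 ≥ pvCup cup 1)) ||
                 (PySem.Dict.get? val (s.1 - pvCup cup 0, s.2 - pvCup cup 1)).getD false))) val) s =
        if s ∈ L then some (pvL cups d0 s.1 s.2) else none := by
  intro S
  induction S with
  | nil =>
    intro Q val hQ hval s
    simp only [List.foldl_nil]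
    rw [hval s, hQ]
    simp
  | cons s0 S' ihS =>
    intro Q val hQ hval s
    have hs0L : s0 ∈ L := by rw [hQ]; exact List.mem_append.mpr (Or.inr List.mem_cons_self)
    have hv : (match PySem.Dict.get? d0 (pvKey s0.1 s0.2) with
             | some b => b
             | none =>
               if s0.2 ≤ 0 then false
               else cups.any (fun cup =>
                 (decide (pvCup cup 0 ≥ s0.1) && decide (s0.2 ≥ pvCup cup 1)) ||
                 (PySem.Dict.get? val (s0.1 - pvCup cup 0, s0.2 - pvCup cup 1)).getD false)) =
        pvL cups d0 s0.1 s0.2 := by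
      rcases hgd : PySem.Dict.get? d0 (pvKey s0.1 s0.2) with _ | b
      · by_cases h0 : s0.2 ≤ 0
        · simp only [h0, if_true]
          simp [pvL, pvF, hgd, h0]
        · simp only [if_neg h0]
          rw [pvL_step cups d0 hg s0.1 s0.2 hgd (by omega)]
          apply pvAny_congr
          intro cup hcup
          have hcc : 1 ≤ pvCup cup 1 := (hg cup hcup).2
          have hchildL : (s0.1 - pvCup cup 0, s0.2 - pvCup cup 1) ∈ L :=
            hclosed s0 hs0L hgd (by omega) cup hcup
          have hchildQ : (s0.1 - pvCup cup 0, s0.2 - pvCup cup 1) ∈ Q := by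
            rw [hQ] at hchildL hpair
            rcases List.mem_append.mp hchildL with hq | hrest
            · exact hq
            · exfalso
              have hrel := (List.pairwise_append.mp hpair).2.1
              rcases List.mem_cons.mp hrest with heq | hrest2
              · have : s0.2 - pvCup cup 1 = s0.2 := congrArg Prod.snd heq
                omega
              · have := (List.pairwise_cons.mp hrel).1 _ hrest2
                simp only at this
                omega
          rw [hval]
          simp only [hchildQ, if_pos]
          simp [pvP]
      · simp [pvL, pvF, hgd]
    simp only [List.foldl_cons]
    rw [ihS (Q ++ [s0]) _ (by rw [hQ]; simp) (by
      intro t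
      rw [PySem.Dict.get?_insert]
      by_cases ht : t = s0
      · subst ht
        rw [if_pos rfl, hv, if_pos (by simp)]
      · rw [if_neg ht, hval t]
        by_cases htQ : t ∈ Q
        · simp [htQ]
        · simp [htQ, ht]) s]

theorem pvAlt_correct (cups : List (List Int)) (d0 : PySem.Dict String Bool) (hg : pvGood cups)
    (low high : Int) :
    ((pvEval cups d0 (PySem.List.sorted (pvBfs cups d0 (high.toNat + 2) [(low, high)] (PySem.Set.ofList [(low, high)])) (fun s => s.2) false)).get? (low, high)).getD false = pvL cups d0 low high := by
  have hof : PySem.Set.ofList [(low, high)] = [(low, high)] :=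
    PySem.Set.ofList_eq_self_of_nodup [(low, high)] (by simp)
  rw [hof]
  obtain ⟨hsub, hclosure, hndR⟩ := pvBfs_spec cups d0 hg (high.toNat + 2) [(low, high)] [(low, high)]
    (fun x hx => hx)
    (fun x hx _ => Or.inr hx)
    (by
      intro x hx hpos
      rcases List.mem_singleton.mp hx with rfl
      simp only
      omega)
    (by simp)
  have hmemL : ∀ x : Int × Int,
      (x ∈ PySem.List.sorted (pvBfs cups d0 (high.toNat + 2) [(low, high)] [(low, high)]) (fun s => s.2) false ↔
        x ∈ pvBfs cups d0 (high.toNat + 2) [(low, high)] [(low, high)]) :=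
    fun x => PySem.List.mem_sorted _ _ _ x
  have hpairL := PySem.List.sorted_pairwise
    (xs := pvBfs cups d0 (high.toNat + 2) [(low, high)] [(low, high)]) (key := fun s : Int × Int => s.2)
  have heval := pvEval_go cups d0 hg
    (PySem.List.sorted (pvBfs cups d0 (high.toNat + 2) [(low, high)] [(low, high)]) (fun s => s.2) false)
    hpairL
    (by
      intro t htL hget hpos cup hcup
      have hskip : pvSkip d0 t = false := by
        simp only [pvSkip, Bool.or_eq_false_iff, decide_eq_false_iff_not]
        constructor
        · rw [PySem.Dict.contains_eq_isSome_get?, hget]; rfl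
        · omega
      exact (hmemL _).mpr (hclosure t ((hmemL t).mp htL) hskip cup hcup))
    (PySem.List.sorted (pvBfs cups d0 (high.toNat + 2) [(low, high)] [(low, high)]) (fun s => s.2) false)
    [] PySem.Dict.empty rfl (by intro t; simp [PySem.Dict.get?_empty])
    (low, high)
  have hin : ((low, high) : Int × Int) ∈
      PySem.List.sorted (pvBfs cups d0 (high.toNat + 2) [(low, high)] [(low, high)]) (fun s => s.2) false :=
    (hmemL _).mpr (hsub _ (List.mem_singleton_self _))
  simp only [pvEval]
  rw [heval, if_pos hin]
  rfl

-- ===== VERDICT (by name: the statement is the Claim_ definition above) =====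
theorem ambiguousMeasurements_spec : Claim_equal_ambiguousMeasurements := by
  intro cups low high cached _ hpre
  unfold Spec_ambiguousMeasurements
  by_cases hc : PySem.Dict.contains (PySem.Dict.ofList (cached.getD [])) (pvKey low high) = true
  · -- start state answered by the supplied cache: both sides return the cached value
    obtain ⟨b, hget⟩ : ∃ b, PySem.Dict.get? (PySem.Dict.ofList (cached.getD [])) (pvKey low high) = some b := by
      rw [PySem.Dict.contains_eq_isSome_get?] at hc
      exact Option.isSome_iff_exists.mp hc
    have hskip0 : pvSkip (PySem.Dict.ofList (cached.getD [])) (low, high) = true := by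
      simp [pvSkip, hc]
    have hA : ambiguousMeasurements cups low high cached = b := by
      simp [ambiguousMeasurements, pvGoA, hget]
    have hbfs : pvBfs cups (PySem.Dict.ofList (cached.getD [])) (high.toNat + 2) [(low, high)]
        (PySem.Set.ofList [(low, high)]) = [(low, high)] := by
      rw [PySem.Set.ofList_eq_self_of_nodup [(low, high)] (by simp)]
      show pvBfs _ _ (high.toNat + 1 + 1) _ _ = _
      simp [pvBfs, hskip0]
    have hB : ambiguousMeasurements_alt cups low high cached = b := by
      simp only [ambiguousMeasurements_alt]
      rw [hbfs, PySem.List.sorted_eq_self_of_pairwise [(low, high)] (fun s => s.2) (by simp)]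
      simp [pvEval, hget]
    rw [hA, hB]
  · by_cases hhi : high ≤ 0
    · -- start state not cached and high ≤ 0: both sides return false
      have hget : PySem.Dict.get? (PySem.Dict.ofList (cached.getD [])) (pvKey low high) = none := by
        rw [PySem.Dict.contains_eq_isSome_get?] at hc
        rcases hget0 : PySem.Dict.get? (PySem.Dict.ofList (cached.getD [])) (pvKey low high) with _ | b
        · rfl
        · rw [hget0] at hc; simp at hc
      have hskip0 : pvSkip (PySem.Dict.ofList (cached.getD [])) (low, high) = true := by
        simp [pvSkip, hhi]
      have hA : ambiguousMeasurements cups low high cached = false := by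
        simp [ambiguousMeasurements, pvGoA, hget, hhi]
      have hbfs : pvBfs cups (PySem.Dict.ofList (cached.getD [])) (high.toNat + 2) [(low, high)]
          (PySem.Set.ofList [(low, high)]) = [(low, high)] := by
        rw [PySem.Set.ofList_eq_self_of_nodup [(low, high)] (by simp)]
        show pvBfs _ _ (high.toNat + 1 + 1) _ _ = _
        simp [pvBfs, hskip0]
      have hB : ambiguousMeasurements_alt cups low high cached = false := by
        simp only [ambiguousMeasurements_alt]
        rw [hbfs, PySem.List.sorted_eq_self_of_pairwise [(low, high)] (fun s => s.2) (by simp)]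
        simp [pvEval, hget, hhi]
      rw [hA, hB]
    · -- the well-formed-cups case: both sides compute pvL
      have hgood : pvGood cups := by
        rcases hpre with h | h | h
        · exact absurd h hc
        · exact absurd h hhi
        · exact h
      have hinv0 : pvInv cups (PySem.Dict.ofList (cached.getD []))
          (PySem.Dict.ofList (cached.getD [])) := by
        refine ⟨fun k b h => h, ?_⟩
        intro lo hi b hget
        simp [pvL, pvF, hget]
      have hA := (pvGoA_correct cups (PySem.Dict.ofList (cached.getD [])) hgood
        (high.toNat + 1) low high (PySem.Dict.ofList (cached.getD [])) (by omega) hinv0).1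
      have hB := pvAlt_correct cups (PySem.Dict.ofList (cached.getD [])) hgood low high
      simp only [ambiguousMeasurements, ambiguousMeasurements_alt]
      rw [hA, ← hB]
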